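-- pv_equiv track=rewrite | github.com/softwareconnect/idps-ai | src-py/cnn_model_data_generator_2.0.py | exponential_decay_layers
-- ===== SOURCE A (Python) =====
-- def calculate_start_units(num_layers):
--     """
--     Calculate the start_units for the first dense layer based on the number of dense layers.
--
--     Parameters:
--     num_layers (int): The number of dense layers in the network.
--
--     Returns:
--     int: The calculated start_units.
--     """
--     if num_layers >= 1 and num_layers <= 5:
--         # Shallow network (1-5 layers)
--         start_units = 16
--     elif 6 <= num_layers <= 10:
--         # Moderate-depth network (6-10 layers)
--         start_units = 128
--     elif 11 <= num_layers <= 20: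
--         # Deep network (11-20 layers)
--         start_units = 32768
--     else:
--         raise ValueError("num_layers should be between 1 and 20.")
--
--     return start_units
--
-- def exponential_decay_layers(num_layers, min_units=64):
--     # Calculate the start units based on the number of layers
--     start_units = calculate_start_units(num_layers)
--
--     layers = []
--     units = start_units
--     for i in range(num_layers):
--         layers.append(units)
--         units = max(units // 2, min_units)  # Halve the units at each step, ensure it doesn't go below min_units
--     return layers
-- ===== SOURCE B (Python) =====
-- def calculate_start_units(num_layers):
--     if num_layers >= 1 and num_layers <= 5:
--         start_units = 16
--     elif 6 <= num_layers <= 10: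
--         start_units = 128
--     elif 11 <= num_layers <= 20:
--         start_units = 32768
--     else:
--         raise ValueError("num_layers should be between 1 and 20.")
--     return start_units
--
-- def exponential_decay_layers(num_layers, min_units=64):
--     # Closed form: layer i (i >= 1) is start_units floor-divided by 2^i, clamped at min_units;
--     # layer 0 is start_units itself (the loop never clamps the first element).
--     start_units = calculate_start_units(num_layers)
--     return [start_units] + [max(start_units // (2 ** i), min_units)
--                             for i in range(1, num_layers)]
-- ===== Notes on version B (the rewrite author's own statement) =====
-- stated objective: simpler
-- what changed: Replaces the sequential halve-and-clamp loop carrying a running 'units' accumulator by a closed-form comprehension: layer i (i>=1) equals max(start_units // 2**i, min_units), the first layer stays start_units.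
import Mathlib
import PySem

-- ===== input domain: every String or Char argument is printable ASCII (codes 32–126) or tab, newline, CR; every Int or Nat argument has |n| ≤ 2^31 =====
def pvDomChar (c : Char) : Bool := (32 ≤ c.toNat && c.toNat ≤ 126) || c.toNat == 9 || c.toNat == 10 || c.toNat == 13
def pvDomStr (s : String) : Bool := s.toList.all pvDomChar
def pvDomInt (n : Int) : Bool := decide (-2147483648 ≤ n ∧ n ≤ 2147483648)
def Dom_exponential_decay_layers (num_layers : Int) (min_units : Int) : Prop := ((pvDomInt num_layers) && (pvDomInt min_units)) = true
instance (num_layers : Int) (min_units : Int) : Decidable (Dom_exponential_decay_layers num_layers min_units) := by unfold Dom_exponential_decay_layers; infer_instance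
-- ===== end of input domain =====

-- B replaces A's sequential halve-and-clamp loop by a per-index closed form (simpler, no carried state).

-- ===== PORT A =====
-- calculate_start_units; the ValueError branch (num_layers outside 1..20) is excluded by Pre_, 0 is a placeholder there.
def calcStartUnits (num_layers : Int) : Int :=
  if 1 ≤ num_layers ∧ num_layers ≤ 5 then 16
  else if 6 ≤ num_layers ∧ num_layers ≤ 10 then 128
  else if 11 ≤ num_layers ∧ num_layers ≤ 20 then 32768
  else 0

def exponential_decay_layers (num_layers : Int) (min_units : Int) : List Int :=
  let start_units := calcStartUnits num_layers
  ((PySem.List.pyRange 0 num_layers 1).foldl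
    (fun (st : List Int × Int) _ =>
      (st.1 ++ [st.2], max (PySem.Int.floordiv st.2 2) min_units))
    (([] : List Int), start_units)).1

-- ===== PORT B =====
def exponential_decay_layers_alt (num_layers : Int) (min_units : Int) : List Int :=
  let start_units := calcStartUnits num_layers
  [start_units] ++ (PySem.List.pyRange 1 num_layers 1).map
    (fun i => max (PySem.Int.floordiv start_units (2 ^ i.toNat)) min_units)

-- ===== PRECONDITION & SPEC =====
-- A raises ValueError unless 1 <= num_layers <= 20.
def Pre_exponential_decay_layers (num_layers : Int) (min_units : Int) : Prop :=
  1 ≤ num_layers ∧ num_layers ≤ 20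

instance (num_layers : Int) (min_units : Int) : Decidable (Pre_exponential_decay_layers num_layers min_units) := by
  unfold Pre_exponential_decay_layers; infer_instance

def pvWitness_exponential_decay_layers : Int × Int := (7, 64)

def Spec_exponential_decay_layers (num_layers : Int) (min_units : Int) (out : List Int) : Prop :=
  out = exponential_decay_layers_alt num_layers min_units

instance (num_layers : Int) (min_units : Int) (out : List Int) : Decidable (Spec_exponential_decay_layers num_layers min_units out) := by
  unfold Spec_exponential_decay_layers; infer_instance

-- ===== CLAIM (what is proved, stated in full; the proofs are below) =====
def Claim_equal_exponential_decay_layers : Prop := ∀ (num_layers : Int) (min_units : Int), Dom_exponential_decay_layers num_layers min_units → Pre_exponential_decay_layers num_layers min_units → Spec_exponential_decay_layers num_layers min_units (exponential_decay_layers num_layers min_units)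

-- ===== LEMMAS AND PROOFS =====

-- one step of A's loop on the running units value
def pvStep (m u : Int) : Int := max (PySem.Int.floordiv u 2) m

-- A's fold, characterised: state after consuming a list of length k
lemma pv_foldA (m : Int) (l : List Int) (acc : List Int) (u : Int) :
    (l.foldl (fun (st : List Int × Int) _ =>
        (st.1 ++ [st.2], max (PySem.Int.floordiv st.2 2) m)) (acc, u))
      = (acc ++ (List.range l.length).map (fun j => (pvStep m)^[j] u),
         (pvStep m)^[l.length] u) := by
  induction l generalizing acc u with
  | nil => simp
  | cons x xs ih =>
      simp only [List.foldl_cons, List.length_cons]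
      have hstep : max (PySem.Int.floordiv u 2) m = pvStep m u := rfl
      rw [hstep, ih (acc ++ [u]) (pvStep m u)]
      simp only [Prod.mk.injEq]
      refine ⟨?_, (Function.iterate_succ_apply _ _ _).symm⟩
      rw [List.range_succ_eq_map]
      simp only [List.map_cons, Function.iterate_zero_apply, List.map_map, Function.comp_def,
        Function.iterate_succ_apply, List.append_assoc, List.singleton_append]

lemma pv_clamp_step (m x : Int) (hx : 0 ≤ x) :
    max (PySem.Int.floordiv (max x m) 2) m = max (PySem.Int.floordiv x 2) m := by
  rw [PySem.Int.floordiv_eq_ediv_of_pos (by omega), PySem.Int.floordiv_eq_ediv_of_pos (by omega)]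
  omega

lemma pv_floordiv_pow_nonneg (s : Int) (hs : 0 ≤ s) (j : Nat) :
    0 ≤ PySem.Int.floordiv s (2 ^ j) := by
  rw [PySem.Int.floordiv_eq_ediv_of_pos (by positivity)]
  exact Int.ediv_nonneg hs (by positivity)

lemma pv_floordiv_pow_succ (s : Int) (k : Nat) :
    PySem.Int.floordiv (PySem.Int.floordiv s (2 ^ (k + 1))) 2
      = PySem.Int.floordiv s (2 ^ (k + 2)) := by
  rw [PySem.Int.floordiv_eq_ediv_of_pos (show (0:Int) < 2 ^ (k+1) by positivity),
      PySem.Int.floordiv_eq_ediv_of_pos (show (0:Int) < 2 by norm_num),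
      PySem.Int.floordiv_eq_ediv_of_pos (show (0:Int) < 2 ^ (k+2) by positivity),
      Int.ediv_ediv_of_nonneg (by positivity)]
  norm_num [pow_succ]

lemma pv_iter_closed (m s : Int) (hs : 0 ≤ s) (k : Nat) :
    (pvStep m)^[k + 1] s = max (PySem.Int.floordiv s (2 ^ (k + 1))) m := by
  induction k with
  | zero => simp [pvStep]
  | succ k ih =>
      rw [Function.iterate_succ_apply', ih]
      unfold pvStep
      rw [pv_clamp_step m _ (pv_floordiv_pow_nonneg s hs (k + 1)),
          pv_floordiv_pow_succ]

-- ===== VERDICT (by name: the statement is the Claim_ definition above) =====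
theorem exponential_decay_layers_spec : Claim_equal_exponential_decay_layers := by
  intro n m _ hpre
  obtain ⟨h1, h2⟩ := hpre
  unfold Spec_exponential_decay_layers
  simp only [exponential_decay_layers, exponential_decay_layers_alt]
  set s := calcStartUnits n with hsdef
  have hs : 0 ≤ s := by
    unfold calcStartUnits at hsdef
    rw [hsdef]; split_ifs <;> omega
  rw [pv_foldA m]
  rw [PySem.List.length_pyRange_one, PySem.List.pyRange_one]
  have hn : (n - 0).toNat = (n - 1).toNat + 1 := by omega
  rw [hn, List.range_succ_eq_map]
  simp only [List.map_cons, Function.iterate_zero_apply, List.map_map, List.cons_append,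
    List.nil_append]
  congr 1
  apply List.map_congr_left
  intro k _
  simp only [Function.comp_apply]
  rw [pv_iter_closed m s hs k, show ((1:Int) + (k:Int)).toNat = k + 1 from by omega]
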